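-- pv_equiv track=rewrite | github.com/rodoufu/challenges | ProjectEuler/25.py | fibonacci_digits
-- ===== SOURCE A (Python) =====
-- def fibonacci_digits(n):
--    a = b = 1
--    count = 2
--    while len(str(b)) < n:
--       t = a + b
--       a = b
--       b = t
--       count += 1
--    return count
-- ===== SOURCE B (Python) =====
-- def fibonacci_digits(n):
--     # Index of the first Fibonacci number (F(1)=F(2)=1) with at least n digits:
--     # exponential + binary search on the index, Fibonacci values by fast doubling.
--     if n <= 1:
--         return 2
--     target = 10 ** (n - 1)
--
--     def fib_pair(k):
--         # (F(k), F(k+1)) by fast doubling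
--         if k == 0:
--             return (0, 1)
--         f, g = fib_pair(k // 2)
--         c = f * (2 * g - f)
--         d = f * f + g * g
--         if k % 2 == 0:
--             return (c, d)
--         return (d, c + d)
--
--     lo, hi = 2, 4
--     while fib_pair(hi)[0] < target:
--         lo, hi = hi, hi * 2
--     while hi - lo > 1:
--         mid = (lo + hi) // 2
--         if fib_pair(mid)[0] < target:
--             lo = mid
--         else:
--             hi = mid
--     return hi
-- ===== Notes on version B (the rewrite author's own statement) =====
-- stated objective: faster
-- what changed: A walks the Fibonacci sequence linearly, calling str() on every term to count digits; B computes the decimal threshold once and finds the first index whose Fibonacci number reaches it by exponential search plus binary search on the index, evaluating Fibonacci numbers with fast doubling.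
import Mathlib
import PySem

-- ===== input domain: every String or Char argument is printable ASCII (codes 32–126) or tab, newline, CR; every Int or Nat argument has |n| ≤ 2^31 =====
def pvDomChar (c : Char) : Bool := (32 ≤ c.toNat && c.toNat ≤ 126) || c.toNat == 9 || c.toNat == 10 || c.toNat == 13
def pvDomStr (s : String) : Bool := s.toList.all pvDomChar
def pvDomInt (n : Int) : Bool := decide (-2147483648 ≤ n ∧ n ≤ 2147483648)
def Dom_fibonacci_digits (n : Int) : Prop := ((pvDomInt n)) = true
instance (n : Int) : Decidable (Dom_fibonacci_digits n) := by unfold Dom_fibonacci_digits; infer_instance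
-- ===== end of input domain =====

-- B replaces A's linear scan (a str() per Fibonacci step) by an exponential + binary search on
-- the index, computing Fibonacci numbers by fast doubling (objective: faster).


-- ===== PORT A =====
-- 'a = b = 1; count = 2; while len(str(b)) < n: a, b = b, a + b; count += 1; return count'.
-- The while loop runs on a fuel counter (a totality guard only: the proofs below show the
-- generous fuel 10^(n.toNat+1) is never exhausted, so the port computes exactly A's loop).

def fibLoopA : Nat → Int → Int → Int → Int → Int
  | 0, _n, _a, _b, count => count
  | fuel + 1, n, a, b, count =>
    if PySem.Str.len (PySem.Int.toStr b) < n then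
      fibLoopA fuel n b (a + b) (count + 1)
    else count

def fibonacci_digits (n : Int) : Int := fibLoopA (10 ^ (n.toNat + 1)) n 1 1 2

-- ===== PORT B =====
-- Source B: fast-doubling fib_pair (its argument k is a nonnegative index, so it is ported over
-- Nat), exponential search doubling hi, then binary search on [lo, hi].  The two while loops
-- run on fuel counters (totality guards only: the proofs below show the chosen fuels are
-- never exhausted, so the ports compute exactly Source B's loops).

def fibPairB (k : Nat) : Int × Int :=
  if h : k = 0 then (0, 1)
  else
    let p := fibPairB (k / 2)
    let f := p.1
    let g := p.2
    let c := f * (2 * g - f)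
    let d := f * f + g * g
    if k % 2 = 0 then (c, d) else (d, c + d)
termination_by k
decreasing_by exact Nat.div_lt_self (Nat.pos_of_ne_zero h) one_lt_two

def expLoopB : Nat → Int → Int → Int → Int × Int
  | 0, _target, lo, hi => (lo, hi)
  | fuel + 1, target, lo, hi =>
    if (fibPairB hi.toNat).1 < target then
      expLoopB fuel target hi (hi * 2)
    else (lo, hi)

def binLoopB : Nat → Int → Int → Int → Int
  | 0, _target, _lo, hi => hi
  | fuel + 1, target, lo, hi =>
    if 1 < hi - lo then
      let mid := PySem.Int.floordiv (lo + hi) 2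
      if (fibPairB mid.toNat).1 < target then
        binLoopB fuel target mid hi
      else
        binLoopB fuel target lo mid
    else hi

def fibonacci_digits_alt (n : Int) : Int :=
  if n ≤ 1 then 2
  else
    let target : Int := 10 ^ (n - 1).toNat   -- 10 ** (n - 1); the exponent is ≥ 1 here
    let p := expLoopB target.toNat target 2 4
    binLoopB (p.2 - p.1).toNat target p.1 p.2

-- ===== PRECONDITION & SPEC =====
def Spec_fibonacci_digits (n : Int) (out : Int) : Prop := out = fibonacci_digits_alt n
instance (n : Int) (out : Int) : Decidable (Spec_fibonacci_digits n out) := by unfold Spec_fibonacci_digits; infer_instance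

-- ===== CLAIM (what is proved, stated in full; the proofs are below) =====
def Claim_equal_fibonacci_digits : Prop := ∀ (n : Int), Dom_fibonacci_digits n → Spec_fibonacci_digits n (fibonacci_digits n)

-- ===== LEMMAS AND PROOFS =====

lemma pvToDigitsCore_length_eq (f : Nat) : ∀ n : Nat, n < f →
    (Nat.toDigitsCore 10 f n []).length = Nat.log 10 n + 1 := by
  induction f with
  | zero => intro n h; omega
  | succ f ih =>
    intro n h
    simp only [Nat.toDigitsCore]
    by_cases h10 : n / 10 = 0
    · have hn : n < 10 := by omega
      simp [h10, Nat.log_eq_zero_iff.mpr (Or.inl hn)]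
    · have hn : 10 ≤ n := by omega
      simp only [h10, if_false]
      rw [Nat.toDigitsCore_lens_eq, ih (n / 10) (by omega)]
      have hd := Nat.log_div_base 10 n
      have hp := Nat.log_pos (by norm_num : 1 < 10) hn
      omega

-- length of str(b) for b ≥ 1
lemma pvLenToStr (b : Int) (hb : 1 ≤ b) :
    PySem.Str.len (PySem.Int.toStr b) = (Nat.log 10 b.toNat : Int) + 1 := by
  have hneg : ¬ b < 0 := by omega
  simp only [PySem.Str.len, PySem.Int.toList_toStr, PySem.Int.toChars, hneg, if_false]
  rw [show Nat.toDigits 10 b.toNat = Nat.toDigitsCore 10 (b.toNat + 1) b.toNat [] from rfl,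
    pvToDigitsCore_length_eq _ _ (by omega)]
  push_cast; ring

-- A's loop test, as an arithmetic condition
lemma pvCondIff (b n : Int) (hb : 1 ≤ b) :
    (PySem.Str.len (PySem.Int.toStr b) < n) ↔ (2 ≤ n ∧ b.toNat < 10 ^ (n.toNat - 1)) := by
  rw [pvLenToStr b hb]
  have hb0 : b.toNat ≠ 0 := by omega
  have hiff := Nat.log_lt_iff_lt_pow (b := 10) (by norm_num) (y := b.toNat) hb0
                 (x := n.toNat - 1)
  constructor
  · intro h
    have h2 : 2 ≤ n := by omega
    exact ⟨h2, hiff.mp (by omega)⟩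
  · rintro ⟨h2, hlt⟩
    have := hiff.mpr hlt
    omega

-- if the loop test already fails, A's loop returns count for any fuel
lemma pvFibLoopA_stop (fuel : Nat) (n a b count : Int)
    (h : ¬ PySem.Str.len (PySem.Int.toStr b) < n) :
    fibLoopA fuel n a b count = count := by
  cases fuel with
  | zero => rfl
  | succ fuel => exact if_neg h

-- with enough fuel, A's loop returns the first index ≥ count whose Fibonacci number
-- reaches the threshold 10^(n-1)
lemma pvFibLoopA_boundary (n : Int) (hn : 2 ≤ n) : ∀ (fuel : Nat) (a b count : Int),
    1 ≤ a → a ≤ b → 2 ≤ count →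
    a = (Nat.fib (count.toNat - 1) : Int) → b = (Nat.fib count.toNat : Int) →
    10 ^ (n.toNat - 1) ≤ b.toNat + fuel →
    count ≤ fibLoopA fuel n a b count ∧
      ((10 : Nat) ^ (n.toNat - 1) : Nat) ≤ Nat.fib (fibLoopA fuel n a b count).toNat ∧
      ∀ j : Nat, count.toNat ≤ j → j < (fibLoopA fuel n a b count).toNat →
        Nat.fib j < 10 ^ (n.toNat - 1) := by
  intro fuel
  induction fuel with
  | zero =>
    intro a b count ha hb h2 hA hB hfuel
    rw [show fibLoopA 0 n a b count = count from rfl]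
    refine ⟨le_refl _, ?_, by omega⟩
    rw [hB] at hfuel
    simpa using hfuel
  | succ fuel ih =>
    intro a b count ha hb h2 hA hB hfuel
    rw [fibLoopA]
    by_cases h : PySem.Str.len (PySem.Int.toStr b) < n
    · rw [if_pos h]
      have hb1 : 1 ≤ b := ha.trans hb
      have hlt : b.toNat < 10 ^ (n.toNat - 1) := ((pvCondIff b n hb1).mp h).2
      obtain ⟨ih1, ih2, ih3⟩ := ih b (a + b) (count + 1) hb1
        (le_add_of_nonneg_left (zero_le_one.trans ha)) (by omega)
        (by rw [hB, show (count + 1).toNat - 1 = count.toNat by omega])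
        (by
          rw [hA, hB, show (count + 1).toNat = count.toNat - 1 + 2 by omega, Nat.fib_add_two,
            show count.toNat - 1 + 1 = count.toNat by omega]
          push_cast
          ring)
        (by omega)
      refine ⟨by omega, ih2, ?_⟩
      intro j hj1 hj2
      by_cases hj : j = count.toNat
      · subst hj
        rw [hB] at hlt
        omega
      · exact ih3 j (by omega) hj2
    · rw [if_neg h]
      have hb1 : 1 ≤ b := ha.trans hb
      rw [pvCondIff b n hb1] at h
      push Not at h
      refine ⟨le_refl _, ?_, by omega⟩
      have := h hn
      rw [hB] at this
      omega

-- the fast-doubling pair is (F(k), F(k+1))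
lemma pvFibPairB_eq (k : Nat) : fibPairB k = ((Nat.fib k : Int), (Nat.fib (k + 1) : Int)) := by
  induction k using Nat.strong_induction_on with
  | _ k ih =>
    rw [fibPairB]
    by_cases h0 : k = 0
    · simp [h0]
    · simp only [h0, dif_neg, not_false_iff]
      rw [ih (k / 2) (by omega)]
      have hfm : Nat.fib (k / 2) ≤ 2 * Nat.fib (k / 2 + 1) := by
        have := Nat.fib_mono (show k / 2 ≤ k / 2 + 1 by omega)
        omega
      set m := k / 2 with hm
      by_cases he : k % 2 = 0
      · have hk : k = 2 * m := by omega
        simp only [he, if_true, Prod.mk.injEq]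
        constructor
        · rw [hk, Nat.fib_two_mul]
          push_cast [Nat.cast_sub hfm]
          ring
        · rw [show k + 1 = 2 * m + 1 by omega, Nat.fib_two_mul_add_one]
          push_cast
          ring
      · have hk : k = 2 * m + 1 := by omega
        simp only [he, if_false, Prod.mk.injEq]
        constructor
        · rw [hk, Nat.fib_two_mul_add_one]
          push_cast
          ring
        · rw [show k + 1 = 2 * m + 2 by omega,
            show 2 * m + 2 = (2 * m) + 2 from rfl, Nat.fib_add_two,
            Nat.fib_two_mul, Nat.fib_two_mul_add_one]
          push_cast [Nat.cast_sub hfm]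
          ring

-- fib k is at least k - 2: the doubling search cannot run out of fuel
lemma pvLeFibAddTwo (k : Nat) : k ≤ Nat.fib (k + 2) := by
  induction k with
  | zero => simp
  | succ k ih =>
    have h1 : 0 < Nat.fib (k + 1) := Nat.fib_pos.mpr (by omega)
    have h2 : Nat.fib (k + 3) = Nat.fib (k + 1) + Nat.fib (k + 2) :=
      Nat.fib_add_two (n := k + 1)
    show k + 1 ≤ Nat.fib (k + 3)
    omega

-- the exponential search keeps 2 ≤ lo < hi and establishes fib lo < target ≤ fib hi
lemma pvExpLoopB_boundary (target : Int) : ∀ (fuel : Nat) (lo hi : Int),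
    2 ≤ lo → lo < hi → (Nat.fib lo.toNat : Int) < target →
    target.toNat + 2 ≤ hi.toNat + fuel →
    2 ≤ (expLoopB fuel target lo hi).1 ∧
      (expLoopB fuel target lo hi).1 < (expLoopB fuel target lo hi).2 ∧
      (Nat.fib (expLoopB fuel target lo hi).1.toNat : Int) < target ∧
      target ≤ (Nat.fib (expLoopB fuel target lo hi).2.toNat : Int) := by
  intro fuel
  induction fuel with
  | zero =>
    intro lo hi hlo hhi hL hfuel
    show 2 ≤ lo ∧ lo < hi ∧ (Nat.fib lo.toNat : Int) < target ∧
      target ≤ (Nat.fib hi.toNat : Int)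
    refine ⟨hlo, hhi, hL, ?_⟩
    have h1 := pvLeFibAddTwo (hi.toNat - 2)
    have h2 := Nat.fib_mono (show hi.toNat - 2 + 2 ≤ hi.toNat by omega)
    omega
  | succ fuel ih =>
    intro lo hi hlo hhi hL hfuel
    rw [expLoopB]
    by_cases h : (fibPairB hi.toNat).1 < target
    · rw [if_pos h]
      rw [pvFibPairB_eq] at h
      exact ih hi (hi * 2) (by omega) (by omega) h (by omega)
    · rw [if_neg h]
      rw [pvFibPairB_eq] at h
      refine ⟨hlo, hhi, hL, ?_⟩
      show target ≤ (Nat.fib hi.toNat : Int)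
      omega

-- the binary search narrows to the boundary index
lemma pvBinLoopB_boundary (target : Int) : ∀ (fuel : Nat) (lo hi : Int),
    2 ≤ lo → lo < hi → (hi - lo).toNat ≤ fuel →
    (Nat.fib lo.toNat : Int) < target → target ≤ (Nat.fib hi.toNat : Int) →
    3 ≤ binLoopB fuel target lo hi ∧
      (Nat.fib ((binLoopB fuel target lo hi).toNat - 1) : Int) < target ∧
      target ≤ (Nat.fib (binLoopB fuel target lo hi).toNat : Int) := by
  intro fuel
  induction fuel with
  | zero => intro lo hi hlo hhi hfuel hL hH; omega
  | succ fuel ih =>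
    intro lo hi hlo hhi hfuel hL hH
    rw [binLoopB]
    by_cases h : 1 < hi - lo
    · rw [if_pos h]
      have hmid : lo < PySem.Int.floordiv (lo + hi) 2 ∧ PySem.Int.floordiv (lo + hi) 2 < hi := by
        simp only [PySem.Int.floordiv, Int.fdiv_eq_ediv]
        split <;> omega
      by_cases hc : (fibPairB (PySem.Int.floordiv (lo + hi) 2).toNat).1 < target
      · rw [if_pos hc]
        rw [pvFibPairB_eq] at hc
        exact ih _ hi (by omega) (by omega) (by omega) hc hH
      · rw [if_neg hc]
        rw [pvFibPairB_eq] at hc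
        exact ih lo _ hlo (by omega) (by omega) hL (by omega)
    · rw [if_neg h]
      have hhi1 : hi = lo + 1 := by omega
      refine ⟨by omega, ?_, hH⟩
      rw [show hi.toNat - 1 = lo.toNat by omega]
      exact hL

-- the boundary index is unique
lemma pvBoundaryUnique (T : Int) (k r : Nat) (hkT : T ≤ (Nat.fib k : Int))
    (hkprev : ∀ j : Nat, 2 ≤ j → j < k → (Nat.fib j : Int) < T)
    (hr : 3 ≤ r) (hrprev : (Nat.fib (r - 1) : Int) < T) (hrT : T ≤ (Nat.fib r : Int)) :
    k = r := by
  rcases lt_trichotomy k r with h | h | h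
  · have hm := Nat.fib_mono (show k ≤ r - 1 by omega)
    have : (Nat.fib k : Int) ≤ (Nat.fib (r - 1) : Int) := by exact_mod_cast hm
    omega
  · exact h
  · have := hkprev r (by omega) h
    omega

-- ===== VERDICT (by name: the statement is the Claim_ definition above) =====
theorem fibonacci_digits_spec : Claim_equal_fibonacci_digits := by
  unfold Claim_equal_fibonacci_digits
  intro n _
  unfold Spec_fibonacci_digits fibonacci_digits fibonacci_digits_alt
  by_cases hn : n ≤ 1
  · rw [if_pos hn, pvFibLoopA_stop]
    have h1 : PySem.Str.len (PySem.Int.toStr 1) = 1 := by decide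
    omega
  · rw [if_neg hn]
    have hn2 : 2 ≤ n := by omega
    set T : Int := (10 : Int) ^ (n - 1).toNat with hT
    show fibLoopA (10 ^ (n.toNat + 1)) n 1 1 2
        = binLoopB ((expLoopB T.toNat T 2 4).2 - (expLoopB T.toNat T 2 4).1).toNat T
            (expLoopB T.toNat T 2 4).1 (expLoopB T.toNat T 2 4).2
    -- B's threshold is A's threshold
    have htar : T = ((10 ^ (n.toNat - 1) : Nat) : Int) := by
      rw [hT, show (n - 1).toNat = n.toNat - 1 by omega]
      push_cast
      ring
    have hT10 : (10 : Int) ≤ T := by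
      rw [hT]
      calc (10 : Int) = 10 ^ 1 := by norm_num
        _ ≤ 10 ^ (n - 1).toNat := by
              apply pow_le_pow_right₀ (by norm_num) (by omega)
    -- A's side: the boundary at the first index ≥ 2
    have hfuelA : 10 ^ (n.toNat - 1) ≤ (1 : Int).toNat + 10 ^ (n.toNat + 1) := by
      have := Nat.pow_le_pow_right (show 1 ≤ 10 by norm_num)
        (show n.toNat - 1 ≤ n.toNat + 1 by omega)
      omega
    obtain ⟨hA1, hA2, hA3⟩ := pvFibLoopA_boundary n hn2 (10 ^ (n.toNat + 1)) 1 1 2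
      (le_refl 1) (le_refl 1) (by norm_num) (by decide) (by decide) hfuelA
    -- B's side: the boundary found by the two searches
    have hfib2 : (Nat.fib (2 : Int).toNat : Int) = 1 := by decide
    obtain ⟨hp1, hp2, hE1, hE2⟩ := pvExpLoopB_boundary T T.toNat 2 4
      (le_refl 2) (by decide) (by omega) (by omega)
    obtain ⟨hB1, hB2, hB3⟩ := pvBinLoopB_boundary T _ _ _ hp1 hp2 (le_refl _) hE1 hE2
    -- glue via uniqueness of the boundary index
    have hkey := pvBoundaryUnique T (fibLoopA (10 ^ (n.toNat + 1)) n 1 1 2).toNat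
      (binLoopB ((expLoopB T.toNat T 2 4).2 - (expLoopB T.toNat T 2 4).1).toNat T
        (expLoopB T.toNat T 2 4).1 (expLoopB T.toNat T 2 4).2).toNat
      (by rw [htar]; exact_mod_cast hA2)
      (by intro j hj1 hj2
          have := hA3 j (by omega) hj2
          rw [htar]
          exact_mod_cast this)
      (by omega) hB2 hB3
    omega
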